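-- pv_equiv track=rewrite | github.com/HenningGC/ReturnsScraper | leadership_scrapper.py | data_select
-- ===== SOURCE A (Python) =====
-- def data_select(data):
-- 	result = []
--
-- 	count = 0
-- 	rule = 3
-- 	for i in range(len(data)-1):
--
-- 		count += 1
--
--
-- 		if rule > 4:
-- 			rule = 4
--
-- 		if count == rule:
-- 			result.append(data[i-1])
-- 			result.append(data[i])
-- 			count = 0
-- 			rule +=1
--
-- 	return(result)
-- ===== SOURCE B (Python) =====
-- def data_select(data):
--     # Arithmetic walk: the counter machine emits the pair (data[i-1], data[i])
--     # exactly at i = 2, 6, 10, ... while i < len(data)-1.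
--     result = []
--     i = 2
--     n = len(data) - 1
--     while i < n:
--         result.append(data[i - 1])
--         result.append(data[i])
--         i += 4
--     return result
-- ===== Notes on version B (the rewrite author's own statement) =====
-- stated objective: simpler
-- what changed: Replaces the simulated count/rule state machine with a direct arithmetic walk over the emit indices 2, 6, 10, ... (step 4), appending data[i-1], data[i] at each; no counter or rule state is maintained.
import Mathlib
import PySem

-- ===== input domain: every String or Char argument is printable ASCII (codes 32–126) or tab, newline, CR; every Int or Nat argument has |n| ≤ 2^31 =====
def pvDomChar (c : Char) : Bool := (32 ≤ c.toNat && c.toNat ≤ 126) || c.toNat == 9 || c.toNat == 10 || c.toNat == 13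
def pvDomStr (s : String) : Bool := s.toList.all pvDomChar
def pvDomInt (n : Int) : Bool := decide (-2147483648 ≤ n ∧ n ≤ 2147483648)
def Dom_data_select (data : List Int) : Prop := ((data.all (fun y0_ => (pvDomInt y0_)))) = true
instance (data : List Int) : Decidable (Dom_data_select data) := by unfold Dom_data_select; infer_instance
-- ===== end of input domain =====

-- B replaces A's count/rule state machine by a direct arithmetic walk over the
-- emit indices 2, 6, 10, … ; objective: simpler.

-- ===== PORT A =====
-- one iteration of A's for-loop body; state = (result, count, rule)
def stepA (data : List Int) (st : List Int × Int × Int) (i : Int) : List Int × Int × Int :=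
  let result := st.1
  let count := st.2.1 + 1
  let rule := if st.2.2 > 4 then 4 else st.2.2
  if count = rule then
    (result ++ [PySem.List.pyGetD data (i - 1) 0, PySem.List.pyGetD data i 0], 0, rule + 1)
  else
    (result, count, rule)

def data_select (data : List Int) : List Int :=
  ((PySem.List.pyRange 0 ((data.length : Int) - 1) 1).foldl (stepA data) ([], 0, 3)).1

-- ===== PORT B =====
-- the while-loop of Source B: i = 2; while i < n: append data[i-1], data[i]; i += 4
def altLoop (data : List Int) (n i : Int) (result : List Int) : List Int :=
  if _h : i < n then
    altLoop data n (i + 4) (result ++ [PySem.List.pyGetD data (i - 1) 0, PySem.List.pyGetD data i 0])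
  else
    result
termination_by (n - i).toNat
decreasing_by omega

def data_select_alt (data : List Int) : List Int :=
  altLoop data ((data.length : Int) - 1) 2 []

-- ===== PRECONDITION & SPEC =====
def Spec_data_select (data : List Int) (out : List Int) : Prop := out = data_select_alt data
instance (data : List Int) (out : List Int) : Decidable (Spec_data_select data out) := by unfold Spec_data_select; infer_instance

-- ===== CLAIM (what is proved, stated in full; the proofs are below) =====
def Claim_equal_data_select : Prop := ∀ (data : List Int), Dom_data_select data → Spec_data_select data (data_select data)

-- ===== LEMMAS AND PROOFS =====

-- running four consecutive loop iterations of A from a just-emitted state (count 0, rule ≥ 4)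
-- performs one emission at the fourth index
lemma runFour (data : List Int) (res : List Int) (r i : Int) (hr : 4 ≤ r) :
    List.foldl (stepA data) (res, 0, r) [i, i + 1, i + 2, i + 3]
      = (res ++ [PySem.List.pyGetD data (i + 2) 0, PySem.List.pyGetD data (i + 3) 0], 0, 5) := by
  have hcap : (if r > 4 then 4 else r) = 4 := by split_ifs <;> omega
  have e : i + 3 - 1 = i + 2 := by ring
  simp [List.foldl, stepA, hcap, e]

-- steady state: once A has just emitted (count 0, rule ≥ 4) before index i,
-- the rest of the run equals B's walk starting at i + 3
lemma loop_eq (data : List Int) (n : Int) :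
    ∀ fuel : Nat, ∀ i res (r : Int), (n - i).toNat ≤ fuel → 4 ≤ r →
      ((PySem.List.pyRange i n 1).foldl (stepA data) (res, 0, r)).1 = altLoop data n (i + 3) res := by
  intro fuel
  induction fuel with
  | zero =>
      intro i res r hf hr
      have hni : n ≤ i := by omega
      rw [PySem.List.pyRange_one_eq_nil hni, altLoop]
      simp [show ¬ (i + 3 < n) by omega]
  | succ m ih =>
      intro i res r hf hr
      by_cases h : i + 3 < n
      · have hsplit : PySem.List.pyRange i n 1
            = PySem.List.pyRange i (i + 4) 1 ++ PySem.List.pyRange (i + 4) n 1 :=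
          PySem.List.pyRange_one_append i (i + 4) n (by omega) (by omega)
        have hfour : PySem.List.pyRange i (i + 4) 1 = [i, i + 1, i + 2, i + 3] := by
          rw [PySem.List.pyRange_one_cons (by omega), PySem.List.pyRange_one_cons (by omega),
              PySem.List.pyRange_one_cons (by omega), PySem.List.pyRange_one_cons (by omega),
              PySem.List.pyRange_one_eq_nil (by omega)]
          norm_num
          constructor <;> ring
        rw [hsplit, List.foldl_append, hfour, runFour data res r i hr]
        rw [ih (i + 4) _ 5 (by omega) (by omega)]
        conv_rhs => rw [altLoop]
        simp only [h, dite_true]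
        have e1 : i + 3 - 1 = i + 2 := by ring
        have e2 : i + 3 + 4 = i + 4 + 3 := by ring
        rw [e1, e2]
      · -- fewer than four indices left: no emission, result stays res
        conv_rhs => rw [altLoop]
        simp only [h, dite_false]
        have hcap : (if r > 4 then 4 else r) = 4 := by split_ifs <;> omega
        have hcases : n ≤ i ∨ n = i + 1 ∨ n = i + 2 ∨ n = i + 3 := by omega
        rcases hcases with h0 | h1 | h2 | h3
        · rw [PySem.List.pyRange_one_eq_nil h0]; rfl
        · subst h1
          rw [PySem.List.pyRange_one_cons (by omega), PySem.List.pyRange_one_eq_nil (by omega)]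
          simp [List.foldl, stepA, hcap]
        · subst h2
          rw [PySem.List.pyRange_one_cons (by omega), PySem.List.pyRange_one_cons (by omega),
              PySem.List.pyRange_one_eq_nil (by omega)]
          simp [List.foldl, stepA, hcap]
        · subst h3
          rw [PySem.List.pyRange_one_cons (by omega), PySem.List.pyRange_one_cons (by omega),
              PySem.List.pyRange_one_cons (by omega), PySem.List.pyRange_one_eq_nil (by omega)]
          simp [List.foldl, stepA, hcap]

-- ===== VERDICT (by name: the statement is the Claim_ definition above) =====
theorem data_select_spec : Claim_equal_data_select := by
  intro data _
  unfold Spec_data_select data_select data_select_alt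
  set n : Int := (data.length : Int) - 1 with hn
  by_cases h : 3 ≤ n
  · have hsplit : PySem.List.pyRange 0 n 1
        = PySem.List.pyRange 0 3 1 ++ PySem.List.pyRange 3 n 1 :=
      PySem.List.pyRange_one_append 0 3 n (by omega) (by omega)
    have h3 : PySem.List.pyRange 0 3 1 = [0, 1, 2] := by decide
    rw [hsplit, List.foldl_append, h3]
    have hpre : List.foldl (stepA data) ([], 0, 3) [0, 1, 2]
        = ([PySem.List.pyGetD data 1 0, PySem.List.pyGetD data 2 0], 0, 4) := by
      simp [List.foldl, stepA]
    rw [hpre, loop_eq data n (n - 3).toNat 3 _ 4 (by omega) (by omega)]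
    conv_rhs => rw [altLoop]
    simp [show (2 : Int) < n by omega]
  · -- fewer than four elements: no emission on either side
    conv_rhs => rw [altLoop]
    simp only [show ¬ (2 : Int) < n by omega, dite_false]
    have hcases : n ≤ 0 ∨ n = 1 ∨ n = 2 := by omega
    rcases hcases with h0 | h1 | h2
    · rw [PySem.List.pyRange_one_eq_nil h0]; rfl
    · rw [h1]; simp [show PySem.List.pyRange 0 1 1 = [0] from by decide, List.foldl, stepA]
    · rw [h2]; simp [show PySem.List.pyRange 0 2 1 = [0, 1] from by decide, List.foldl, stepA]
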